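-- pv_equiv track=rewrite | github.com/755452800/leetcode-python | jewels-and-stones.py | numJewelsInStones
-- ===== SOURCE A (Python) =====
-- def numJewelsInStones(jewels, stones):
--     """
--     :type jewels: str
--     :type stones: str
--     :rtype: int
--     """
--     d = {}
--     for i in jewels:
--         d[i] = 0
--     for j in stones:
--         if j in d:
--             d[j] += 1
--     return sum(d.values())
--
-- jewels = "aA"
--
-- stones = "aAAbbbb"
-- ===== SOURCE B (Python) =====
-- def numJewelsInStones(jewels, stones):
--     return sum(stones.count(j) for j in set(jewels))
-- ===== Notes on version B (the rewrite author's own statement) =====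
-- stated objective: idiomatic
-- what changed: Instead of building a dict of per-jewel counters and scanning stones once against it, B dedups jewels with set() and sums stones.count(j) over the distinct jewels, scanning stones once per distinct jewel.
import Mathlib
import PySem

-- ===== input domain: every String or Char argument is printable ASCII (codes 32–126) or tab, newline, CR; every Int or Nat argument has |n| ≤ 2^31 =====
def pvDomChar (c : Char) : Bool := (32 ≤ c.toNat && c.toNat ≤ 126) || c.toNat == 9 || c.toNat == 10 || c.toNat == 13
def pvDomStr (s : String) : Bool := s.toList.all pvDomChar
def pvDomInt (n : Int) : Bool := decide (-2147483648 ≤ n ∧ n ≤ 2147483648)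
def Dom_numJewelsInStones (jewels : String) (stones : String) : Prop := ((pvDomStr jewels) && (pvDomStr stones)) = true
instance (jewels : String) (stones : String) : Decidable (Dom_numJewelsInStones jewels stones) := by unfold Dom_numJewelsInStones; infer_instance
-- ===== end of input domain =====

-- B replaces A's dict-of-counters single scan of stones by summing stones.count(j) over the distinct jewels (idiomatic; same return value).

-- ===== PORT A =====
-- d = {}; for i in jewels: d[i] = 0; for j in stones: if j in d: d[j] += 1; return sum(d.values())
def numJewelsInStones (jewels : String) (stones : String) : Int :=
  let d := jewels.toList.foldl (fun d i => d.insert i (0 : Int)) PySem.Dict.empty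
  let d := stones.toList.foldl (fun d j => if d.contains j then d.modify j 0 (· + 1) else d) d
  d.values.sum

-- ===== PORT B =====
-- return sum(stones.count(j) for j in set(jewels))   (sum is order-independent, so Set's insertion order is faithful)
def numJewelsInStones_alt (jewels : String) (stones : String) : Int :=
  ((PySem.Set.ofList jewels.toList).map
    (fun j => (PySem.Chars.count stones.toList [j] : Int))).sum

-- ===== PRECONDITION & SPEC =====
def Spec_numJewelsInStones (jewels : String) (stones : String) (out : Int) : Prop := out = numJewelsInStones_alt jewels stones
instance (jewels : String) (stones : String) (out : Int) : Decidable (Spec_numJewelsInStones jewels stones out) := by unfold Spec_numJewelsInStones; infer_instance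

-- ===== CLAIM (what is proved, stated in full; the proofs are below) =====
def Claim_equal_numJewelsInStones : Prop := ∀ (jewels : String) (stones : String), Dom_numJewelsInStones jewels stones → Spec_numJewelsInStones jewels stones (numJewelsInStones jewels stones)

-- ===== LEMMAS AND PROOFS =====

-- str.count with a single-character needle is the element count
theorem chars_count_go_singleton (c : Char) (l : List Char) (fuel acc : Nat)
    (h : l.length ≤ fuel) :
    PySem.Chars.count.go [c] fuel l acc = acc + l.count c := by
  induction l generalizing fuel acc with
  | nil => cases fuel <;> simp [PySem.Chars.count.go]
  | cons x t ih =>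
      cases fuel with
      | zero => simp at h
      | succ n =>
          simp only [PySem.Chars.count.go, List.isPrefixOf, List.length_cons] at *
          by_cases hx : c = x
          · subst hx
            simp only [BEq.rfl, Bool.true_and, if_true]
            simp only [List.length_nil, List.drop_succ_cons, List.drop_zero]
            rw [ih n (acc + 1) (by omega)]
            simp
            omega
          · rw [if_neg (by simp [hx])]
            rw [ih n acc (by omega)]
            simp [Ne.symm hx]

theorem chars_count_singleton (c : Char) (l : List Char) :
    PySem.Chars.count l [c] = l.count c := by
  simp only [PySem.Chars.count, List.isEmpty_cons, if_false, Bool.false_eq_true]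
  simpa using chars_count_go_singleton c l l.length 0 le_rfl

-- the jewel dict: every stored value is 0
theorem jewelDict_getD_zero (l : List Char) (d : PySem.Dict Char Int)
    (h : ∀ k, d.getD k 0 = 0) (k : Char) :
    (l.foldl (fun d i => d.insert i (0 : Int)) d).getD k 0 = 0 := by
  induction l generalizing d with
  | nil => exact h k
  | cons x t ih =>
      simp only [List.foldl_cons]
      refine ih _ (fun k' => ?_)
      rw [PySem.Dict.getD_insert]
      split_ifs with h' <;> simp [h]

-- the stones loop never changes the key set
theorem stoneLoop_keys (l : List Char) (d : PySem.Dict Char Int) :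
    (l.foldl (fun d j => if d.contains j then d.modify j 0 (· + 1) else d) d).keys = d.keys := by
  induction l generalizing d with
  | nil => rfl
  | cons x t ih =>
      simp only [List.foldl_cons]
      by_cases hc : d.contains x = true
      · rw [if_pos hc, ih, PySem.Dict.keys_modify, PySem.Dict.keys_insert_of_contains _ _ hc]
      · rw [if_neg hc, ih]

-- the stones loop adds, at each key, the count of the guarded stones
theorem stoneLoop_getD (l : List Char) (d : PySem.Dict Char Int) (k : Char) :
    (l.foldl (fun d j => if d.contains j then d.modify j 0 (· + 1) else d) d).getD k 0
      = d.getD k 0 + ((l.filter (fun j => d.contains j)).count k : Int) := by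
  induction l generalizing d with
  | nil => simp
  | cons x t ih =>
      simp only [List.foldl_cons, List.filter_cons]
      by_cases hc : d.contains x = true
      · rw [if_pos hc, if_pos hc, ih]
        have hfilt : t.filter (fun j => (d.modify x 0 (· + 1)).contains j)
            = t.filter (fun j => d.contains j) := by
          refine List.filter_congr (fun y _ => ?_)
          rw [PySem.Dict.contains_modify]
          by_cases hy : y = x
          · subst hy; simp [hc]
          · simp [hy]
        rw [hfilt]
        by_cases hk : k = x
        · subst hk
          rw [PySem.Dict.getD_modify_self]
          simp only [List.count_cons, beq_self_eq_true, if_true]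
          push_cast
          ring
        · rw [PySem.Dict.getD_modify_of_ne _ _ _ hk]
          simp only [List.count_cons]
          rw [if_neg (fun h => hk (beq_iff_eq.mp h).symm)]
          simp
      · rw [if_neg hc, if_neg hc, ih]

-- ===== VERDICT (by name: the statement is the Claim_ definition above) =====
theorem numJewelsInStones_spec : Claim_equal_numJewelsInStones := by
  intro jewels stones _
  unfold Spec_numJewelsInStones numJewelsInStones numJewelsInStones_alt
  simp only []
  set d0 := jewels.toList.foldl (fun d i => d.insert i (0 : Int)) PySem.Dict.empty with hd0
  set d2 := stones.toList.foldl (fun d j => if d.contains j then d.modify j 0 (· + 1) else d) d0 with hd2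
  have hkeys0 : d0.keys = PySem.Set.ofList jewels.toList := by
    rw [hd0, PySem.Dict.keys_foldl_insert]
    simp [PySem.Set.update, PySem.Set.ofList_eq_foldl, PySem.Dict.keys_empty]
  have hkeys2 : d2.keys = PySem.Set.ofList jewels.toList := by
    rw [hd2, stoneLoop_keys, hkeys0]
  have hnodup : d2.keys.Nodup := by
    rw [hkeys2]; exact PySem.Set.nodup_ofList _
  rw [PySem.Dict.values_eq_map_keys d2 hnodup 0, hkeys2]
  refine congrArg List.sum (List.map_congr_left (fun k hk => ?_))
  have hkmem : k ∈ jewels.toList := (PySem.Set.mem_ofList _ _).mp hk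
  have hcont : d0.contains k = true := by
    rw [PySem.Dict.contains_eq_decide_mem_keys, hkeys0]
    simp [PySem.Set.mem_ofList, hkmem]
  have h0 : d0.getD k 0 = 0 :=
    jewelDict_getD_zero _ _ (fun k' => by simp [PySem.Dict.getD_empty]) k
  rw [hd2, stoneLoop_getD, h0, chars_count_singleton,
      List.count_filter hcont]
  simp
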